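-- pv_equiv track=rewrite | github.com/pvarkhedi/ReplicationProject | run.py | getRevertedPairs
-- ===== SOURCE A (Python) =====
-- def getRevertedPairs(tuples):
--     if len(tuples) == 0:
--         return {}
--
--     countMutualReverts = {}
--     alreadyChecked = []
--
--     for tup in tuples:
--
--         if tup in alreadyChecked:
--             continue
--         if (tup[1], tup[0]) in alreadyChecked:
--             continue
--         alreadyChecked.append(tup)
--
--         for possibleMutual in tuples:
--             if possibleMutual == (tup[1], tup[0]):
--                 if tup in countMutualReverts:
--                     countMutualReverts[tup] = countMutualReverts[tup] + 1
--                 else: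
--                     countMutualReverts[tup] = 1
--
--     return countMutualReverts
-- ===== SOURCE B (Python) =====
-- def getRevertedPairs(tuples):
--     counts = {}
--     for t in tuples:
--         counts[t] = counts.get(t, 0) + 1
--     result = {}
--     seen = set()
--     for t in tuples:
--         if t in seen or (t[1], t[0]) in seen:
--             continue
--         seen.add(t)
--         c = counts.get((t[1], t[0]), 0)
--         if c:
--             result[t] = c
--     return result
-- ===== Notes on version B (the rewrite author's own statement) =====
-- stated objective: faster
-- what changed: B builds a count dictionary of all tuples in one pass and replaces A's inner full-list scan per representative (and list-membership alreadyChecked) with a single ordered pass using a hash set and O(1) count lookups.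
import Mathlib
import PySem

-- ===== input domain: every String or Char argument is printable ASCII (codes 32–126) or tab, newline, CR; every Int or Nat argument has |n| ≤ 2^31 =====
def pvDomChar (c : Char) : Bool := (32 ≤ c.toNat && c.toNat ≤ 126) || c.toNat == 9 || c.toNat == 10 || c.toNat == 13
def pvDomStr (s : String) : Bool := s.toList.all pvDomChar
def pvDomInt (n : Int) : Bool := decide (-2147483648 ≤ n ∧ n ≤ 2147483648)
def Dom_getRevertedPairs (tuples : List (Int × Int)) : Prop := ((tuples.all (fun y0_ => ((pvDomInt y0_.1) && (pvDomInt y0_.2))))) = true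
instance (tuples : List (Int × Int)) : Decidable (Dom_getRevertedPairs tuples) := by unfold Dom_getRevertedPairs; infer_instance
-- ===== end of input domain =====

-- B replaces A's quadratic rescans by one count-dict built in a single pass plus a seen-set, one ordered pass (objective: faster).


-- ===== PORT A =====
-- inner 'for possibleMutual in tuples' loop of A
def pvInnerA (tuples : List (Int × Int)) (tup : Int × Int)
    (c : PySem.Dict (Int × Int) Int) : PySem.Dict (Int × Int) Int :=
  tuples.foldl (fun c pm =>
    if pm = (tup.2, tup.1) then
      match c.get? tup with
      | some v => c.insert tup (v + 1)
      | none => c.insert tup 1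
    else c) c

def getRevertedPairs (tuples : List (Int × Int)) : List (Int × Int × Int) :=
  if tuples.length = 0 then [] else
  let st := tuples.foldl
    (fun (st : PySem.Dict (Int × Int) Int × List (Int × Int)) tup =>
      if st.2.contains tup then st
      else if st.2.contains (tup.2, tup.1) then st
      else (pvInnerA tuples tup st.1, st.2 ++ [tup]))
    (PySem.Dict.empty, [])
  st.1.items.map (fun p => (p.1.1, p.1.2, p.2))

-- ===== PORT B =====
def getRevertedPairs_alt (tuples : List (Int × Int)) : List (Int × Int × Int) :=
  let counts := tuples.foldl (fun d t => d.insert t (d.getD t 0 + 1)) PySem.Dict.empty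
  let st := tuples.foldl
    (fun (st : PySem.Dict (Int × Int) Int × PySem.Set (Int × Int)) t =>
      if st.2.contains t || st.2.contains (t.2, t.1) then st
      else
        let seen := PySem.Set.add st.2 t
        let c := counts.getD (t.2, t.1) 0
        if c ≠ 0 then (st.1.insert t c, seen) else (st.1, seen))
    (PySem.Dict.empty, PySem.Set.empty)
  st.1.items.map (fun p => (p.1.1, p.1.2, p.2))

-- ===== PRECONDITION & SPEC =====
def Spec_getRevertedPairs (tuples : List (Int × Int)) (out : List (Int × Int × Int)) : Prop := out = getRevertedPairs_alt tuples
instance (tuples : List (Int × Int)) (out : List (Int × Int × Int)) : Decidable (Spec_getRevertedPairs tuples out) := by unfold Spec_getRevertedPairs; infer_instance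

-- ===== CLAIM (what is proved, stated in full; the proofs are below) =====
def Claim_equal_getRevertedPairs : Prop := ∀ (tuples : List (Int × Int)), Dom_getRevertedPairs tuples → Spec_getRevertedPairs tuples (getRevertedPairs tuples)

-- ===== LEMMAS AND PROOFS =====

lemma pvInnerA_insert (l : List (Int × Int)) (tup : Int × Int)
    (c : PySem.Dict (Int × Int) Int) (v : Int) :
    pvInnerA l tup (c.insert tup v)
      = c.insert tup (v + (l.count (tup.2, tup.1) : Int)) := by
  induction l generalizing v with
  | nil => simp [pvInnerA]
  | cons pm t ih =>
    simp only [pvInnerA, List.foldl_cons] at *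
    by_cases h : pm = (tup.2, tup.1)
    · simp [h, PySem.Dict.get?_insert_self, PySem.Dict.insert_insert_self, ih]
      ring_nf
    · simp [h, ih]

lemma pvInnerA_fresh (l : List (Int × Int)) (tup : Int × Int)
    (c : PySem.Dict (Int × Int) Int) (h : c.contains tup = false) :
    pvInnerA l tup c
      = if l.count (tup.2, tup.1) = 0 then c
        else c.insert tup (l.count (tup.2, tup.1) : Int) := by
  induction l with
  | nil => simp [pvInnerA]
  | cons pm t ih =>
    by_cases hp : pm = (tup.2, tup.1)
    · have hg : c.get? tup = none := by
        simp [PySem.Dict.get?_eq_none_iff_contains, h]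
      have h1 : pvInnerA (pm :: t) tup c = pvInnerA t tup (c.insert tup 1) := by
        simp [pvInnerA, hp, hg]
      rw [h1, pvInnerA_insert t tup c 1]
      simp [hp]
      rw [add_comm]
    · have h1 : pvInnerA (pm :: t) tup c = pvInnerA t tup c := by
        simp [pvInnerA, hp]
      rw [h1, ih]
      simp [hp]

lemma pvMain (tuples l : List (Int × Int)) (cnt : PySem.Dict (Int × Int) Int)
    (checked : List (Int × Int))
    (hinv : ∀ k, cnt.contains k = true → checked.contains k = true) :
    (l.foldl
      (fun (st : PySem.Dict (Int × Int) Int × List (Int × Int)) tup =>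
        if st.2.contains tup then st
        else if st.2.contains (tup.2, tup.1) then st
        else (pvInnerA tuples tup st.1, st.2 ++ [tup]))
      (cnt, checked)).1
    = (l.foldl
      (fun (st : PySem.Dict (Int × Int) Int × PySem.Set (Int × Int)) t =>
        if st.2.contains t || st.2.contains (t.2, t.1) then st
        else
          let seen := PySem.Set.add st.2 t
          let c := (tuples.foldl (fun d t => d.insert t (d.getD t 0 + 1)) PySem.Dict.empty).getD (t.2, t.1) 0
          if c ≠ 0 then (st.1.insert t c, seen) else (st.1, seen))
      (cnt, checked)).1 := by
  induction l generalizing cnt checked with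
  | nil => rfl
  | cons t l ih =>
    simp only [List.foldl_cons]
    by_cases h1 : checked.contains t
    · simp only [h1, if_pos, PySem.Set.contains, Bool.true_or]
      exact ih cnt checked hinv
    · by_cases h2 : checked.contains (t.2, t.1)
      · simp only [h1, h2, if_neg, if_pos, PySem.Set.contains, Bool.false_or,
          Bool.not_eq_true]
        exact ih cnt checked hinv
      · have hc : (tuples.foldl (fun d t => d.insert t (d.getD t 0 + 1)) PySem.Dict.empty).getD (t.2, t.1) 0
            = (tuples.count (t.2, t.1) : Int) := by
          rw [PySem.Dict.getD_foldl_insert_add_one]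
          simp
        have hfresh : cnt.contains t = false := by
          by_contra hcc
          simp only [Bool.not_eq_false] at hcc
          exact absurd (hinv t hcc) (by simpa using h1)
        have hadd : PySem.Set.add checked t = checked ++ [t] := by
          simp only [PySem.Set.add]
          rw [if_neg (by simpa [PySem.Set.contains] using h1)]
        simp only [h1, h2, if_neg, PySem.Set.contains, Bool.or_self,
          Bool.false_eq_true, not_false_eq_true, hadd, hc]
        rw [pvInnerA_fresh tuples t cnt hfresh]
        by_cases h0 : tuples.count (t.2, t.1) = 0
        · simp only [h0, Nat.cast_zero, if_true, ne_eq, not_true_eq_false, if_false]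
          apply ih
          intro k hk
          have := hinv k hk
          simp only [List.contains_append, Bool.or_eq_true]
          exact Or.inl this
        · have h0' : (tuples.count (t.2, t.1) : Int) ≠ 0 := by exact_mod_cast h0
          simp only [h0, if_false, h0', ne_eq, not_false_eq_true, if_true]
          apply ih
          intro k hk
          rw [PySem.Dict.contains_insert] at hk
          simp only [List.contains_append, Bool.or_eq_true]
          rcases Bool.or_eq_true_iff.mp hk with hk' | hk'
          · exact Or.inr (by simp [show k = t from by simpa using hk'])
          · exact Or.inl (hinv k hk')

-- ===== VERDICT (by name: the statement is the Claim_ definition above) =====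
theorem getRevertedPairs_spec : Claim_equal_getRevertedPairs := by
  intro tuples _
  unfold Spec_getRevertedPairs
  cases tuples with
  | nil => rfl
  | cons t ts =>
    show getRevertedPairs (t :: ts) = getRevertedPairs_alt (t :: ts)
    unfold getRevertedPairs getRevertedPairs_alt
    simp only [List.length_cons]
    rw [if_neg (by omega)]
    have h := pvMain (t :: ts) (t :: ts) PySem.Dict.empty []
      (by intro k hk; simp [PySem.Dict.contains_empty] at hk)
    rw [h]
    rfl
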